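-- pv_equiv track=rewrite | github.com/sruthiARavi/python-blackjack | challenges/first-pass.py | get_minimum_current_hand_sum
-- ===== SOURCE A (Python) =====
-- card_values = {
--     "A": [1, 11],
--     "2": 2,
--     "3": 3,
--     "4": 4,
--     "5": 5,
--     "6": 6,
--     "7": 7,
--     "8": 8,
--     "9": 9,
--     "10": 10,
--     "J": 10,
--     "Q": 10,
--     "K": 10
-- }
--
-- def get_minimum_current_hand_sum(current_hand):
--     final_sum = 0
--     if "A" in current_hand:
--         sum1 = 0
--         sum2 = 0
--
--         for i in current_hand:
--             if i == "A":
--                 value = card_values[i][0]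
--                 sum1 += value
--             else:
--                 sum1 += card_values[i]
--
--         for i in current_hand:
--             if i == "A":
--                 value = card_values[i][1]
--                 sum2 += value
--             else:
--                 sum2 += card_values[i]
--
--         if sum1 == 21:
--             return sum1
--         elif sum2 == 21:
--             return sum2
--         elif sum1 > 21:
--             final_sum = sum2
--         elif sum2 > 21:
--             final_sum = sum1
--         else:
--             final_sum = min(sum1, sum2)
--
--     else:
--         for i in current_hand:
--             final_sum += card_values[i]
--
--     return final_sum
-- ===== SOURCE B (Python) =====
-- card_values = {
--     "2": 2, "3": 3, "4": 4, "5": 5, "6": 6, "7": 7,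
--     "8": 8, "9": 9, "10": 10, "J": 10, "Q": 10, "K": 10
-- }
--
-- def get_minimum_current_hand_sum(current_hand):
--     base = 0
--     aces = 0
--     for card in current_hand:
--         if card == "A":
--             base += 1
--             aces += 1
--         else:
--             base += card_values[card]
--     if aces == 0:
--         return base
--     sum1 = base
--     sum2 = base + 10 * aces
--     if sum1 == 21:
--         return sum1
--     if sum2 == 21:
--         return sum2
--     if sum1 > 21:
--         return sum2
--     if sum2 > 21:
--         return sum1
--     return min(sum1, sum2)
-- ===== Notes on version B (the rewrite author's own statement) =====
-- stated objective: simpler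
-- what changed: One pass accumulating a base sum (aces as 1) and an ace count, then deriving the all-11 variant arithmetically (base + 10*aces) instead of A's two full rescans plus a separate no-ace loop; same selection ladder.
import Mathlib
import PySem

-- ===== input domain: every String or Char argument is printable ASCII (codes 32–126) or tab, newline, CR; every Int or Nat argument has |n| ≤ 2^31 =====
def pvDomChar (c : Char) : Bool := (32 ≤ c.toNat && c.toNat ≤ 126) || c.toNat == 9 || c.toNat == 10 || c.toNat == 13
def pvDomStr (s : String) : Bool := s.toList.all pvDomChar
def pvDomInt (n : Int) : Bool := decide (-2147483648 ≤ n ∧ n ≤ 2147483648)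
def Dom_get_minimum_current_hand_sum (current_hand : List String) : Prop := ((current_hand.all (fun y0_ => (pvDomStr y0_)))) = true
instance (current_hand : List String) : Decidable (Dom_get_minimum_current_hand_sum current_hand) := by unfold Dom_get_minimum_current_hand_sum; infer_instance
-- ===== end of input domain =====

-- B replaces A's two full rescans (aces as 1 / aces as 11) plus a separate no-ace loop by a
-- single pass counting aces and summing with aces as 1, deriving the 11-variant as base + 10*aces;
-- same selection ladder, same result (objective: simpler).


-- ===== PORT A =====
-- card_values[i] for the non-ace keys; 0 is a junk value for unknown keys (Python raises
-- KeyError there; Pre_ excludes those inputs, so the junk value is never reached).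
def pvCardVal (s : String) : Int :=
  if s = "2" then 2 else if s = "3" then 3 else if s = "4" then 4 else if s = "5" then 5
  else if s = "6" then 6 else if s = "7" then 7 else if s = "8" then 8 else if s = "9" then 9
  else if s = "10" then 10 else if s = "J" then 10 else if s = "Q" then 10 else if s = "K" then 10
  else 0

def get_minimum_current_hand_sum (current_hand : List String) : Int :=
  if "A" ∈ current_hand then
    let sum1 := current_hand.foldl (fun s i => if i = "A" then s + 1 else s + pvCardVal i) 0
    let sum2 := current_hand.foldl (fun s i => if i = "A" then s + 11 else s + pvCardVal i) 0
    if sum1 = 21 then sum1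
    else if sum2 = 21 then sum2
    else if sum1 > 21 then sum2
    else if sum2 > 21 then sum1
    else min sum1 sum2
  else
    current_hand.foldl (fun s i => s + pvCardVal i) 0

-- ===== PORT B =====
def get_minimum_current_hand_sum_alt (current_hand : List String) : Int :=
  let p := current_hand.foldl
    (fun (st : Int × Int) c => if c = "A" then (st.1 + 1, st.2 + 1) else (st.1 + pvCardVal c, st.2))
    (0, 0)
  if p.2 = 0 then p.1
  else
    let sum1 := p.1
    let sum2 := p.1 + 10 * p.2
    if sum1 = 21 then sum1
    else if sum2 = 21 then sum2
    else if sum1 > 21 then sum2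
    else if sum2 > 21 then sum1
    else min sum1 sum2

-- ===== PRECONDITION & SPEC =====
-- Pre_ excludes exactly the hands containing a card outside card_values, on which Python A
-- (and B alike) raises KeyError.
def Pre_get_minimum_current_hand_sum (current_hand : List String) : Prop :=
  ∀ c ∈ current_hand, c ∈ ["A","2","3","4","5","6","7","8","9","10","J","Q","K"]
instance (current_hand : List String) : Decidable (Pre_get_minimum_current_hand_sum current_hand) := by unfold Pre_get_minimum_current_hand_sum; infer_instance
def pvWitness_get_minimum_current_hand_sum : List String := ["A", "10", "7"]

def Spec_get_minimum_current_hand_sum (current_hand : List String) (out : Int) : Prop := out = get_minimum_current_hand_sum_alt current_hand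
instance (current_hand : List String) (out : Int) : Decidable (Spec_get_minimum_current_hand_sum current_hand out) := by unfold Spec_get_minimum_current_hand_sum; infer_instance

-- ===== CLAIM (what is proved, stated in full; the proofs are below) =====
def Claim_equal_get_minimum_current_hand_sum : Prop := ∀ (current_hand : List String), Dom_get_minimum_current_hand_sum current_hand → Pre_get_minimum_current_hand_sum current_hand → Spec_get_minimum_current_hand_sum current_hand (get_minimum_current_hand_sum current_hand)

-- ===== LEMMAS AND PROOFS =====

-- B's pair fold, componentwise: first = A's sum1 fold, second = the number of aces.
theorem pair_fold_eq (l : List String) (a c : Int) :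
    l.foldl (fun (st : Int × Int) x => if x = "A" then (st.1 + 1, st.2 + 1) else (st.1 + pvCardVal x, st.2)) (a, c)
      = (l.foldl (fun s i => if i = "A" then s + 1 else s + pvCardVal i) a,
         c + (l.count "A" : Int)) := by
  induction l generalizing a c with
  | nil => simp
  | cons h t ih =>
    by_cases hh : h = "A"
    · subst hh
      simp only [List.foldl_cons, ih, List.count_cons_self, Prod.mk.injEq]
      exact ⟨rfl, by push_cast; ring⟩
    · simp [List.foldl_cons, ih, hh]

-- shifting the accumulator of A's sum1 fold shifts the result
theorem f1_shift (l : List String) (a d : Int) :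
    l.foldl (fun s i => if i = "A" then s + 1 else s + pvCardVal i) (a + d)
      = l.foldl (fun s i => if i = "A" then s + 1 else s + pvCardVal i) a + d := by
  induction l generalizing a with
  | nil => rfl
  | cons x t ih =>
    by_cases hx : x = "A"
    · simp only [List.foldl_cons, if_pos hx]
      have h : a + d + 1 = (a + 1) + d := by ring
      rw [h, ih]
    · simp only [List.foldl_cons, if_neg hx]
      have h : a + d + pvCardVal x = (a + pvCardVal x) + d := by ring
      rw [h, ih]

-- A's sum2 fold = sum1 fold + 10 * (number of aces).
theorem sum2_eq (l : List String) (a : Int) :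
    l.foldl (fun s i => if i = "A" then s + 11 else s + pvCardVal i) a
      = l.foldl (fun s i => if i = "A" then s + 1 else s + pvCardVal i) a + 10 * (l.count "A" : Int) := by
  induction l generalizing a with
  | nil => simp
  | cons x t ih =>
    by_cases hx : x = "A"
    · subst hx
      rw [List.foldl_cons, List.foldl_cons, if_pos rfl, ih, List.count_cons_self]
      have h : a + 11 = (a + 1) + 10 := by ring
      rw [h, f1_shift]
      push_cast
      ring
    · rw [List.foldl_cons, List.foldl_cons, if_neg hx, if_neg hx, ih]
      simp [hx]

-- with no ace in the hand, A's plain fold equals the sum1-style fold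
theorem no_ace_fold (l : List String) (a : Int) (h : "A" ∉ l) :
    l.foldl (fun s i => s + pvCardVal i) a
      = l.foldl (fun s i => if i = "A" then s + 1 else s + pvCardVal i) a := by
  induction l generalizing a with
  | nil => rfl
  | cons x t ih =>
    have hx : x ≠ "A" := fun e => h (e ▸ List.mem_cons_self)
    have ht : "A" ∉ t := fun m => h (List.mem_cons_of_mem _ m)
    simp [hx, ih _ ht]

-- ===== VERDICT (by name: the statement is the Claim_ definition above) =====
theorem get_minimum_current_hand_sum_spec : Claim_equal_get_minimum_current_hand_sum := by
  intro l _ _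
  unfold Spec_get_minimum_current_hand_sum get_minimum_current_hand_sum get_minimum_current_hand_sum_alt
  rw [pair_fold_eq, sum2_eq]
  by_cases hc0 : l.count "A" = 0
  · have hA : "A" ∉ l := List.count_eq_zero.mp hc0
    simp [hA, hc0, no_ace_fold l 0 hA]
  · have hA : "A" ∈ l := by
      by_contra h
      exact hc0 (List.count_eq_zero.mpr h)
    simp [hA, hc0]
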